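-- pv_equiv track=rewrite | github.com/imsteev/05839-final-project | wildfires/wildfire_classifier.py | num_to_time
-- ===== SOURCE A (Python) =====
-- def num_to_time(num_time):
--     # num_time is in 24-hour format - so 0 to 2359
--     chars = list(str(int(num_time)))
--     res = []
--     for i in range(len(chars)-1, -1, -1):
--       res.append(chars[i])
--       if len(res) == 2:
--         res.append(":")
--     result = ''.join(res[::-1])
--     if len(result) == 1: result = "00:0" + result
--     if result[0] == ":": result = "00" + result
--     return result
-- ===== SOURCE B (Python) =====
-- def num_to_time(num_time):
--     s = str(int(num_time))
--     if len(s) == 1: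
--         return "00:0" + s
--     if len(s) == 2:
--         return "00:" + s
--     return s[:-2] + ":" + s[-2:]
-- ===== Notes on version B (the rewrite author's own statement) =====
-- stated objective: simpler
-- what changed: Replaces the reverse character-by-character loop with its colon counter and double reversal by a single branch on len(str(int(num_time))) and direct string slicing s[:-2] + ':' + s[-2:].
import Mathlib
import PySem

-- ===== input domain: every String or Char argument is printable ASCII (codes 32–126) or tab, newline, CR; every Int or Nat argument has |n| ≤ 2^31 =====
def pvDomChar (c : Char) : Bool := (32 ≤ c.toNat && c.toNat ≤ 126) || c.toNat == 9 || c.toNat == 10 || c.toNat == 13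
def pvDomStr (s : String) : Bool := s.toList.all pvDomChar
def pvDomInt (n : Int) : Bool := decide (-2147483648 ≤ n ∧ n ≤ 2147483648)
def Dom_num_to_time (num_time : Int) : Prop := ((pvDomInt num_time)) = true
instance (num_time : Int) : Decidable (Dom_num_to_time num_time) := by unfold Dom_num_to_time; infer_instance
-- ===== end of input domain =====

-- B replaces A's reverse character loop with colon counter (and its double reversal)
-- by one branch on len(str(int(num_time))) plus direct slicing: simpler decomposition, same exact output.

-- ===== PORT A =====
-- literal transliteration of A: reversed-index loop appending chars and a ':' once res has 2 chars,
-- then ''.join(res[::-1]) (the [::-1] slice is list reversal, exact), then the two fix-up ifs.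
def num_to_time (num_time : Int) : String :=
  let chars := PySem.Int.toChars num_time            -- list(str(int(num_time)))
  let res := (PySem.List.pyRange ((chars.length : Int) - 1) (-1) (-1)).foldl
      (fun res i =>
        let res := res ++ [PySem.List.pyGetD chars i ' ']   -- chars[i]; i is always in range here
        if res.length = 2 then res ++ [':'] else res) []
  let result := res.reverse                          -- ''.join(res[::-1])
  let result := if result.length = 1 then '0' :: '0' :: ':' :: '0' :: result else result
  let result := if PySem.List.pyGet? result 0 = some ':' then '0' :: '0' :: result else result
  String.mk result

-- ===== PORT B =====
def num_to_time_alt (num_time : Int) : String :=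
  let s := PySem.Int.toChars num_time                -- str(int(num_time))
  if s.length = 1 then String.mk ('0' :: '0' :: ':' :: '0' :: s)
  else if s.length = 2 then String.mk ('0' :: '0' :: ':' :: s)
  else String.mk (PySem.List.slice s none (some (-2)) ++ ':' :: PySem.List.slice s (some (-2)) none)

-- ===== PRECONDITION & SPEC =====
def Spec_num_to_time (num_time : Int) (out : String) : Prop := out = num_to_time_alt num_time
instance (num_time : Int) (out : String) : Decidable (Spec_num_to_time num_time out) := by unfold Spec_num_to_time; infer_instance

-- ===== CLAIM (what is proved, stated in full; the proofs are below) =====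
def Claim_equal_num_to_time : Prop := ∀ (num_time : Int), Dom_num_to_time num_time → Spec_num_to_time num_time (num_to_time num_time)

-- ===== LEMMAS AND PROOFS =====

-- A's loop body, named for the proofs (definitionally the lambda in the port)
def insStep (acc : List Char) (c : Char) : List Char :=
  let acc' := acc ++ [c]
  if acc'.length = 2 then acc' ++ [':'] else acc'

theorem toDigitsCore_ne_nil : ∀ (f n : ℕ) (ds : List Char), ds ≠ [] → Nat.toDigitsCore 10 f n ds ≠ [] := by
  intro f
  induction f with
  | zero => intro n ds h; simpa [Nat.toDigitsCore] using h
  | succ f ih =>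
    intro n ds h
    simp only [Nat.toDigitsCore]
    split
    · simp
    · exact ih _ _ (by simp)

theorem toChars_ne_nil (n : Int) : PySem.Int.toChars n ≠ [] := by
  have h : ∀ m : ℕ, Nat.toDigits 10 m ≠ [] := by
    intro m
    unfold Nat.toDigits
    simp only [Nat.toDigitsCore]
    split
    · simp
    · exact toDigitsCore_ne_nil _ _ _ (by simp)
  unfold PySem.Int.toChars
  split
  · simp
  · exact h _

theorem colon_not_mem_toDigitsCore :
    ∀ (f n : ℕ) (ds : List Char), ':' ∉ ds → ':' ∉ Nat.toDigitsCore 10 f n ds := by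
  intro f
  induction f with
  | zero => intro n ds h; simpa [Nat.toDigitsCore] using h
  | succ f ih =>
    intro n ds h
    have hd : (n % 10).digitChar ≠ ':' := by
      have h10 : n % 10 < 10 := Nat.mod_lt _ (by norm_num)
      interval_cases h2 : (n % 10) <;> decide
    simp only [Nat.toDigitsCore]
    split
    · intro hm
      rcases List.mem_cons.mp hm with h1 | h1
      · exact hd h1.symm
      · exact h h1
    · refine ih _ _ ?_
      intro hm
      rcases List.mem_cons.mp hm with h1 | h1
      · exact hd h1.symm
      · exact h h1

theorem colon_not_mem_toChars (n : Int) : ':' ∉ PySem.Int.toChars n := by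
  have h : ∀ m : ℕ, ':' ∉ Nat.toDigits 10 m := by
    intro m
    unfold Nat.toDigits
    exact colon_not_mem_toDigitsCore _ _ _ (by simp)
  unfold PySem.Int.toChars
  split
  · intro hm
    rcases List.mem_cons.mp hm with h1 | h1
    · exact absurd h1 (by decide)
    · exact h _ h1
  · exact h _

-- range(len-1, -1, -1) is the list of indices len-1, len-2, …, 0
theorem pyRange_down (L : ℕ) (hL : 1 ≤ L) :
    PySem.List.pyRange ((L : Int) - 1) (-1) (-1)
      = (List.range L).map (fun j : ℕ => (L : Int) - 1 - (j : Int)) := by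
  unfold PySem.List.pyRange
  rw [if_neg (by norm_num), if_neg (by norm_num), if_pos (by omega)]
  have hc : (((L : Int) - 1 - (-1) + -(-1) - 1) / -(-1)).toNat = L := by
    norm_num
  rw [hc]
  refine List.map_congr_left ?_
  intro k _
  ring

-- the indices, read through chars[i], spell out chars reversed
theorem map_getter (cs : List Char) :
    (List.range cs.length).map (fun j : ℕ => PySem.List.pyGetD cs ((cs.length : Int) - 1 - (j : Int)) ' ')
      = cs.reverse := by
  apply List.ext_getElem
  · simp
  · intro j h1 h2
    simp only [List.getElem_map, List.getElem_range]
    have hjL : j < cs.length := by simpa using h1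
    rw [PySem.List.pyGetD_eq_getElem cs ' ' (by omega) (by omega)]
    rw [List.getElem_reverse]
    congr 1
    omega

theorem foldl_ins_big : ∀ (t acc : List Char), 2 ≤ acc.length → t.foldl insStep acc = acc ++ t := by
  intro t
  induction t with
  | nil => simp
  | cons c t ih =>
    intro acc h
    have hs : insStep acc c = acc ++ [c] := by
      unfold insStep
      rw [if_neg (by simp; omega)]
    rw [List.foldl_cons, hs, ih _ (by simp; omega)]
    simp

theorem foldl_ins (xs : List Char) :
    xs.foldl insStep [] = if xs.length ≤ 1 then xs else xs.take 2 ++ ':' :: xs.drop 2 := by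
  match xs with
  | [] => simp
  | [a] => simp [insStep]
  | a :: b :: t =>
    have h1 : insStep [] a = [a] := by unfold insStep; simp
    have h2 : insStep [a] b = [a, b, ':'] := by unfold insStep; simp
    rw [List.foldl_cons, List.foldl_cons, h1, h2, foldl_ins_big t _ (by simp)]
    simp

-- the whole equivalence, over an arbitrary nonempty colon-free character list
theorem core (cs : List Char) (hne : cs ≠ []) (hco : ':' ∉ cs) :
    (let res := (PySem.List.pyRange ((cs.length : Int) - 1) (-1) (-1)).foldl
        (fun res i =>
          let res := res ++ [PySem.List.pyGetD cs i ' ']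
          if res.length = 2 then res ++ [':'] else res) []
     let result := res.reverse
     let result := if result.length = 1 then '0' :: '0' :: ':' :: '0' :: result else result
     let result := if PySem.List.pyGet? result 0 = some ':' then '0' :: '0' :: result else result
     String.mk result)
    = if cs.length = 1 then String.mk ('0' :: '0' :: ':' :: '0' :: cs)
      else if cs.length = 2 then String.mk ('0' :: '0' :: ':' :: cs)
      else String.mk (PySem.List.slice cs none (some (-2)) ++ ':' :: PySem.List.slice cs (some (-2)) none) := by
  have hL : 1 ≤ cs.length := List.length_pos_iff.mpr hne
  have e1 : (PySem.List.pyRange ((cs.length : Int) - 1) (-1) (-1)).foldl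
      (fun res i =>
        let res := res ++ [PySem.List.pyGetD cs i ' ']
        if res.length = 2 then res ++ [':'] else res) []
      = cs.reverse.foldl insStep [] := by
    conv_rhs => rw [← map_getter cs]
    rw [pyRange_down cs.length hL, List.foldl_map, List.foldl_map]
    rfl
  simp only [e1, foldl_ins]
  · match cs, hne with
    | [c0], _ =>
      simp [PySem.List.pyGet?, PySem.List.pyIdx?]
    | [c0, c1], _ =>
      simp [PySem.List.pyGet?, PySem.List.pyIdx?]
    | c0 :: c1 :: c2 :: t, _ =>
      have hco0 : c0 ≠ ':' := fun h => hco (h ▸ List.mem_cons_self)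
      have hlen : (c0 :: c1 :: c2 :: t).length = t.length + 3 := by simp
      have hle : ¬ ((c0 :: c1 :: c2 :: t).reverse.length ≤ 1) := by simp
      rw [if_neg hle]
      have hres : ((c0 :: c1 :: c2 :: t).reverse.take 2 ++ ':' :: (c0 :: c1 :: c2 :: t).reverse.drop 2).reverse
          = (c0 :: c1 :: c2 :: t).take ((c0 :: c1 :: c2 :: t).length - 2)
              ++ ':' :: (c0 :: c1 :: c2 :: t).drop ((c0 :: c1 :: c2 :: t).length - 2) := by
        rw [List.reverse_append, List.reverse_cons,
            ← List.rdrop_eq_reverse_drop_reverse, ← List.rtake_eq_reverse_take_reverse]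
        simp [List.rdrop, List.rtake]
      rw [hres]
      have htk : (c0 :: c1 :: c2 :: t).take ((c0 :: c1 :: c2 :: t).length - 2)
          = c0 :: (c1 :: c2 :: t).take (t.length) := by
        rw [hlen]
        simp [List.take_succ_cons]
      have hlen1 : ¬ (((c0 :: c1 :: c2 :: t).take ((c0 :: c1 :: c2 :: t).length - 2)
          ++ ':' :: (c0 :: c1 :: c2 :: t).drop ((c0 :: c1 :: c2 :: t).length - 2)).length = 1) := by
        simp [hlen]
      rw [if_neg hlen1]
      have hget : PySem.List.pyGet? ((c0 :: c1 :: c2 :: t).take ((c0 :: c1 :: c2 :: t).length - 2)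
          ++ ':' :: (c0 :: c1 :: c2 :: t).drop ((c0 :: c1 :: c2 :: t).length - 2)) 0 = some c0 := by
        rw [htk]
        have hpos : (0:Int) ≤ (t.length:Int) + 1 + 1 + 1 := by positivity
        simp [PySem.List.pyGet?, PySem.List.pyIdx?, hpos]
      rw [hget, if_neg (by simpa using hco0)]
      have hs1 : PySem.List.slice (c0 :: c1 :: c2 :: t) none (some (-2))
          = (c0 :: c1 :: c2 :: t).take ((c0 :: c1 :: c2 :: t).length - 2) := by
        simp only [PySem.List.slice, PySem.List.clampIdx]
        rw [if_pos (by norm_num), if_neg (by omega)]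
        simp only [List.drop_zero, Nat.sub_zero]
        congr 1
        omega
      have hs2 : PySem.List.slice (c0 :: c1 :: c2 :: t) (some (-2)) none
          = (c0 :: c1 :: c2 :: t).drop ((c0 :: c1 :: c2 :: t).length - 2) := by
        simp only [PySem.List.slice, PySem.List.clampIdx]
        rw [if_pos (by norm_num), if_neg (by omega)]
        have h2 : ((((c0 :: c1 :: c2 :: t).length : Int)) + -2).toNat = (c0 :: c1 :: c2 :: t).length - 2 := by
          omega
        rw [h2]
        apply List.take_of_length_le
        simp [hlen]
        omega
      rw [if_neg (by simp [hlen]), if_neg (by simp [hlen]), hs1, hs2]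

theorem num_to_time_eq (n : Int) : num_to_time n = num_to_time_alt n := by
  have h := core (PySem.Int.toChars n) (toChars_ne_nil n) (colon_not_mem_toChars n)
  exact h

-- ===== VERDICT (by name: the statement is the Claim_ definition above) =====
theorem num_to_time_spec : Claim_equal_num_to_time := by
  intro n _
  unfold Spec_num_to_time
  exact num_to_time_eq n
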